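-- pv_equiv track=rewrite | github.com/Aphrodicez/CU | ComProg/grader/09_MoreDC/09_NestedLoop_31_Pythagorean_Triple.py | primitive_Pythagorean_triples
-- ===== SOURCE A (Python) =====
-- def gcd(a,b):
--     while b != 0:
--         a,b = b, a%b
--     return a
--
-- def is_coprime(a, b, c):
--     # คืนผลการทดสอบว่า a, b และ c เป็น coprime หรือไม่
--     # อ่านนิยาม coprime ที่ https://en.wikipedia.org/wiki/Coprime_integers
--     return gcd(gcd(a, b), c) == 1
--
-- def primitive_Pythagorean_triples(max_len):
--     # คืนลิสต์ ที่ภายในเก็บลิสต์ย่อยที่มีสมาชิกสามค่าของ a, b และ c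
--     # โดยที่ a <= b <= c <= max_len
--     # ลิสต์ย่อยต่าง ๆ ถูกจัดเรียงตามค่า c จากน้อยไปมาก
--     # หากมีค่า c เท่ากัน ให้เรียงตามค่า a เช่น ถ้า max_len = 65 จะได้
--     # [[3, 4, 5], [5, 12, 13], [8, 15, 17], [7, 24, 25],
--     # [20, 21, 29], [12, 35, 37], [9, 40, 41], [28, 45, 53],
--     # [11, 60, 61], [16, 63, 65], [33, 56, 65]]
--     triple = []
--     for c in range(1, max_len + 1):
--         for a in range(1, c):
--             for b in range(a, c):
--                 if a ** 2 + b ** 2 != c ** 2: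
--                     continue
--                 if not is_coprime(a, b, c):
--                     continue
--                 triple.append([a, b, c])
--     return triple
-- ===== SOURCE B (Python) =====
-- def _gcd(a, b):
--     return a if b == 0 else _gcd(b, a % b)
--
-- def primitive_Pythagorean_triples(max_len):
--     # For each (c, a) find the unique candidate b with b*b == c*c - a*a by
--     # binary search on [a, c-1]; no inner scan over all b.
--     triples = []
--     for c in range(1, max_len + 1):
--         cc = c * c
--         for a in range(1, c):
--             s = cc - a * a
--             lo, hi = a, c - 1
--             while lo < hi:
--                 mid = (lo + hi) // 2
--                 if mid * mid < s:
--                     lo = mid + 1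
--                 else:
--                     hi = mid
--             if lo * lo == s and _gcd(_gcd(a, lo), c) == 1:
--                 triples.append([a, lo, c])
--     return triples
-- ===== Notes on version B (the rewrite author's own statement) =====
-- stated objective: faster
-- what changed: B removes A's innermost scan over all candidate b: for each (c,a) it binary-searches the unique b with b*b = c*c - a*a in [a, c-1] and checks that single candidate, and its gcd is recursive instead of a while loop.
import Mathlib
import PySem

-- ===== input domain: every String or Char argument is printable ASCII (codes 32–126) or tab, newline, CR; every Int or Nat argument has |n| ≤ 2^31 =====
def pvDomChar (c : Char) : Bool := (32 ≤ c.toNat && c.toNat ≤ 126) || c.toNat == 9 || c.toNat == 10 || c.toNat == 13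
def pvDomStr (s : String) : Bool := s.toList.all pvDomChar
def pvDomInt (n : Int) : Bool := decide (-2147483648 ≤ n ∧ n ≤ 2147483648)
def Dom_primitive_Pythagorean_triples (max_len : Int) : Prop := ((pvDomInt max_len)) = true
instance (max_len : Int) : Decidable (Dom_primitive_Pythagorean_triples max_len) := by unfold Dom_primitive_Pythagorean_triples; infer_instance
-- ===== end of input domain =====

-- B replaces A's scan over every candidate b by a binary search for the unique b with
-- b*b = c*c - a*a (objective: faster — the inner loop over b disappears).

-- ===== PORT A =====
-- while b != 0: a, b = b, a % b ; return a
def pyGcd (a b : Int) : Int :=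
  if h : b = 0 then a
  else pyGcd b (PySem.Int.mod a b)
termination_by b.natAbs
decreasing_by
  rcases lt_trichotomy b 0 with hb | hb | hb
  · have := PySem.Int.mod_neg_bounds a hb; omega
  · exact absurd hb h
  · have h1 := PySem.Int.mod_nonneg a hb
    have h2 := PySem.Int.mod_lt a hb
    omega

def isCoprime (a b c : Int) : Bool := pyGcd (pyGcd a b) c == 1

def primitive_Pythagorean_triples (max_len : Int) : List (List Int) :=
  (PySem.List.pyRange 1 (max_len + 1) 1).foldl (fun triple c =>
    (PySem.List.pyRange 1 c 1).foldl (fun triple a =>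
      (PySem.List.pyRange a c 1).foldl (fun triple b =>
        if a ^ 2 + b ^ 2 ≠ c ^ 2 then triple
        else if ¬ (isCoprime a b c) then triple
        else triple ++ [[a, b, c]]) triple) triple) []

-- ===== PORT B =====
-- def _gcd(a, b): return a if b == 0 else _gcd(b, a % b)
def bGcd (a b : Int) : Int :=
  if h : b = 0 then a
  else bGcd b (PySem.Int.mod a b)
termination_by b.natAbs
decreasing_by
  rcases lt_trichotomy b 0 with hb | hb | hb
  · have := PySem.Int.mod_neg_bounds a hb; omega
  · exact absurd hb h
  · have h1 := PySem.Int.mod_nonneg a hb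
    have h2 := PySem.Int.mod_lt a hb
    omega

-- the `while lo < hi` binary-search loop of Source B, on state (lo, hi)
def bSearch (s lo hi : Int) : Int :=
  if h : lo < hi then
    let mid := PySem.Int.floordiv (lo + hi) 2
    if mid * mid < s then bSearch s (mid + 1) hi
    else bSearch s lo mid
  else lo
termination_by (hi - lo).toNat
decreasing_by
  · have := (PySem.Int.floordiv_two_mid_bounds (le_of_lt h)).1
    omega
  · have hmid : PySem.Int.floordiv (lo + hi) 2 < hi :=
      (PySem.Int.floordiv_lt_iff_lt_mul (by norm_num)).2 (by omega)
    omega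

def primitive_Pythagorean_triples_alt (max_len : Int) : List (List Int) :=
  (PySem.List.pyRange 1 (max_len + 1) 1).foldl (fun triples c =>
    let cc := c * c
    (PySem.List.pyRange 1 c 1).foldl (fun triples a =>
      let s := cc - a * a
      let lo := bSearch s a (c - 1)
      if lo * lo = s ∧ bGcd (bGcd a lo) c = 1 then triples ++ [[a, lo, c]]
      else triples) triples) []

-- ===== PRECONDITION & SPEC =====
def Spec_primitive_Pythagorean_triples (max_len : Int) (out : List (List Int)) : Prop := out = primitive_Pythagorean_triples_alt max_len
instance (max_len : Int) (out : List (List Int)) : Decidable (Spec_primitive_Pythagorean_triples max_len out) := by unfold Spec_primitive_Pythagorean_triples; infer_instance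

-- ===== CLAIM (what is proved, stated in full; the proofs are below) =====
def Claim_equal_primitive_Pythagorean_triples : Prop := ∀ (max_len : Int), Dom_primitive_Pythagorean_triples max_len → Spec_primitive_Pythagorean_triples max_len (primitive_Pythagorean_triples max_len)

-- ===== LEMMAS AND PROOFS =====

theorem gcd_eq (a b : Int) : pyGcd a b = bGcd a b := by
  by_cases hb : b = 0
  · rw [pyGcd, bGcd]; simp [hb]
  · rw [pyGcd, bGcd]; simp only [hb, dite_false]
    exact gcd_eq b (PySem.Int.mod a b)
termination_by b.natAbs
decreasing_by
  rcases lt_trichotomy b 0 with h | h | h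
  · have := PySem.Int.mod_neg_bounds a h; omega
  · exact absurd h hb
  · have h1 := PySem.Int.mod_nonneg a h
    have h2 := PySem.Int.mod_lt a h
    omega

theorem bSearch_bounds (s lo hi : Int) (h : lo ≤ hi) :
    lo ≤ bSearch s lo hi ∧ bSearch s lo hi ≤ hi := by
  rw [bSearch]
  by_cases hlt : lo < hi
  · simp only [hlt, dite_true]
    have hmid := PySem.Int.floordiv_two_mid_bounds (le_of_lt hlt)
    have hmlt : PySem.Int.floordiv (lo + hi) 2 < hi :=
      (PySem.Int.floordiv_lt_iff_lt_mul (by norm_num)).2 (by omega)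
    split
    · have := bSearch_bounds s (PySem.Int.floordiv (lo + hi) 2 + 1) hi (by omega)
      omega
    · have := bSearch_bounds s lo (PySem.Int.floordiv (lo + hi) 2) (by omega)
      omega
  · simp only [hlt, dite_false]
    omega
termination_by (hi - lo).toNat
decreasing_by
  · omega
  · omega

theorem bSearch_finds (s lo hi b0 : Int) (h0 : 0 ≤ lo) (h1 : lo ≤ b0) (h2 : b0 ≤ hi)
    (hb : b0 * b0 = s) : bSearch s lo hi = b0 := by
  rw [bSearch]
  by_cases hlt : lo < hi
  · simp only [hlt, dite_true]
    have hmid := PySem.Int.floordiv_two_mid_bounds (le_of_lt hlt)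
    have hmlt : PySem.Int.floordiv (lo + hi) 2 < hi :=
      (PySem.Int.floordiv_lt_iff_lt_mul (by norm_num)).2 (by omega)
    set mid := PySem.Int.floordiv (lo + hi) 2 with hm
    split
    · -- mid * mid < s = b0 * b0, 0 ≤ mid → mid < b0
      rename_i hms
      have hlt2 : mid < b0 := by nlinarith
      exact bSearch_finds s (mid + 1) hi b0 (by omega) (by omega) h2 hb
    · -- b0 * b0 = s ≤ mid * mid, 0 ≤ b0 → b0 ≤ mid
      rename_i hms
      have hle2 : b0 ≤ mid := by nlinarith
      exact bSearch_finds s lo mid b0 h0 h1 hle2 hb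
  · simp only [hlt, dite_false]
    omega
termination_by (hi - lo).toNat
decreasing_by
  · omega
  · omega

theorem filter_unique {l : List Int} {p : Int → Bool} {v : Int}
    (hmem : v ∈ l) (hnd : l.Nodup)
    (huniq : ∀ x ∈ l, p x = true → x = v) :
    l.filter p = if p v then [v] else [] := by
  induction l with
  | nil => cases hmem
  | cons x xs ih =>
    rcases List.nodup_cons.mp hnd with ⟨hnx, hnxs⟩
    rcases List.mem_cons.mp hmem with hv | hv
    · have hfil : xs.filter p = [] := by
        rw [List.filter_eq_nil_iff]
        intro y hy hpy
        have hyv := huniq y (List.mem_cons_of_mem _ hy) hpy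
        subst hyv
        rw [hv] at hy
        exact absurd hy hnx
      rw [hv]
      by_cases hp : p x = true
      · simp [hp, hfil]
      · simp [hp, hfil]
    · have hpx : p x = false := by
        by_contra hc
        have := huniq x (List.mem_cons_self) (by simpa using hc)
        exact hnx (this ▸ hv)
      rw [List.filter_cons_of_neg (by simp [hpx])]
      exact ih hv hnxs (fun y hy hpy => huniq y (List.mem_cons_of_mem _ hy) hpy)

theorem inner_eq (a c : Int) (ha : 1 ≤ a) (hac : a < c) (acc : List (List Int)) :
    (PySem.List.pyRange a c 1).foldl (fun triple b =>
        if a ^ 2 + b ^ 2 ≠ c ^ 2 then triple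
        else if ¬ (isCoprime a b c) then triple
        else triple ++ [[a, b, c]]) acc
    = (if bSearch (c * c - a * a) a (c - 1) * bSearch (c * c - a * a) a (c - 1) = c * c - a * a
           ∧ bGcd (bGcd a (bSearch (c * c - a * a) a (c - 1))) c = 1
       then acc ++ [[a, bSearch (c * c - a * a) a (c - 1), c]] else acc) := by
  set p : Int → Bool := fun b => decide (a ^ 2 + b ^ 2 = c ^ 2) && isCoprime a b c with hp
  have step1 : (PySem.List.pyRange a c 1).foldl (fun triple b =>
        if a ^ 2 + b ^ 2 ≠ c ^ 2 then triple
        else if ¬ (isCoprime a b c) then triple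
        else triple ++ [[a, b, c]]) acc
      = (PySem.List.pyRange a c 1).foldl (fun triple b =>
          if p b = true then triple ++ [[a, b, c]] else triple) acc := by
    apply PySem.List.foldl_congr_mem
    intro acc' x _
    by_cases h1 : a ^ 2 + x ^ 2 = c ^ 2 <;> by_cases h2 : isCoprime a x c = true <;>
      simp [hp, h1, h2]
  rw [step1, PySem.List.foldl_append_if p (fun b => [a, b, c])]
  set b0 := bSearch (c * c - a * a) a (c - 1) with hb0
  have hbnd := bSearch_bounds (c * c - a * a) a (c - 1) (by omega)
  have huniq : ∀ x ∈ PySem.List.pyRange a c 1, p x = true → x = b0 := by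
    intro x hx hpx
    have hxr := PySem.List.mem_pyRange_one.mp hx
    have hsq : a ^ 2 + x ^ 2 = c ^ 2 := by
      have := (Bool.and_eq_true _ _).mp hpx
      exact of_decide_eq_true this.1
    have hxx : x * x = c * c - a * a := by
      have h2 := pow_two a; have h3 := pow_two x; have h4 := pow_two c
      rw [h2, h3, h4] at hsq; omega
    have := bSearch_finds (c * c - a * a) a (c - 1) x (by omega) hxr.1 (by omega) hxx
    omega
  have hmem : b0 ∈ PySem.List.pyRange a c 1 :=
    PySem.List.mem_pyRange_one.mpr ⟨hbnd.1, by omega⟩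
  rw [filter_unique hmem (PySem.List.nodup_pyRange_one a c) huniq]
  have hpiff : p b0 = true ↔ (b0 * b0 = c * c - a * a ∧ bGcd (bGcd a b0) c = 1) := by
    rw [hp]
    simp only [Bool.and_eq_true, decide_eq_true_eq, isCoprime, beq_iff_eq, gcd_eq]
    constructor
    · rintro ⟨h1, h2⟩
      refine ⟨?_, h2⟩
      have h2a := pow_two a; have h3 := pow_two b0; have h4 := pow_two c
      rw [h2a, h3, h4] at h1; omega
    · rintro ⟨h1, h2⟩
      refine ⟨?_, h2⟩
      have h2a := pow_two a; have h3 := pow_two b0; have h4 := pow_two c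
      rw [h2a, h3, h4]; omega
  by_cases hcond : b0 * b0 = c * c - a * a ∧ bGcd (bGcd a b0) c = 1
  · rw [if_pos (hpiff.mpr hcond), if_pos hcond]; simp
  · rw [if_neg (fun h => hcond (hpiff.mp h)), if_neg hcond]; simp

-- ===== VERDICT (by name: the statement is the Claim_ definition above) =====
theorem primitive_Pythagorean_triples_spec : Claim_equal_primitive_Pythagorean_triples := by
  intro max_len _
  unfold Spec_primitive_Pythagorean_triples
  unfold primitive_Pythagorean_triples primitive_Pythagorean_triples_alt
  apply PySem.List.foldl_congr_mem
  intro acc c _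
  apply PySem.List.foldl_congr_mem
  intro acc' a hmem
  have ha := PySem.List.mem_pyRange_one.mp hmem
  exact inner_eq a c ha.1 ha.2 acc'
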